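-- pv_equiv track=rewrite | github.com/daveweir98/ca117 | week-1/conv2decimal_11.py | converter
-- ===== SOURCE A (Python) =====
-- def converter(n, base):
--    n = n[::-1]
--    total = 0
--    i = 0
--    while i < len(n):
--       total = total + ((base**i)*int(n[i]))
--       i += 1
--    return total
-- ===== SOURCE B (Python) =====
-- def converter(n, base):
--     total = 0
--     for c in n:
--         total = total * base + int(c)
--     return total
-- ===== Notes on version B (the rewrite author's own statement) =====
-- stated objective: idiomatic
-- what changed: Replaces the reverse-then-index loop with power computation by a single forward Horner pass (total = total*base + int(c)), removing the reversal, the index variable and the base**i powers.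
import Mathlib
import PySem

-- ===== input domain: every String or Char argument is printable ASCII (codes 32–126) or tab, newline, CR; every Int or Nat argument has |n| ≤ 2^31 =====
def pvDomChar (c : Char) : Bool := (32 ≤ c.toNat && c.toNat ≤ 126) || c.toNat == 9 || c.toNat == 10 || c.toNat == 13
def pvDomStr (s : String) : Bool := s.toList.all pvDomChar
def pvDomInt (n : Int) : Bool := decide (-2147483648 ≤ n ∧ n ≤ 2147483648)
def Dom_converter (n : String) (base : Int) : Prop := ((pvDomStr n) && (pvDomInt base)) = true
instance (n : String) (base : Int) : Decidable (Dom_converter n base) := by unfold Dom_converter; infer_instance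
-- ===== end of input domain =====

-- B changes only the algorithm (Horner's forward pass instead of reversed positional powers); return value proved equal on digit-only strings.

-- int(c) for a one-character string c (exact via PySem.Int.ofStr?; on a digit it is its value)
def pyDigit (c : Char) : Int := (PySem.Int.ofStr? (String.mk [c])).getD 0

-- ===== PORT A =====
-- the while loop of A, step for step: total += base**i * int(n[i]); i += 1
def convLoop (r : List Char) (base : Int) (total : Int) (i : Nat) : Int :=
  if i < r.length then
    convLoop r base (total + base ^ i * pyDigit r[i]!) (i + 1)
  else total
termination_by r.length - i

def converter (n : String) (base : Int) : Int :=
  let r := n.toList.reverse   -- n = n[::-1]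
  convLoop r base 0 0

-- ===== PORT B =====
def converter_alt (n : String) (base : Int) : Int :=
  n.toList.foldl (fun total c => total * base + pyDigit c) 0

-- ===== PRECONDITION & SPEC =====
-- Pre_ excludes exactly the strings containing a non-digit character, on which both Pythons raise ValueError (int(c)).
def Pre_converter (n : String) (base : Int) : Prop := (n.toList.all Char.isDigit) = true
instance (n : String) (base : Int) : Decidable (Pre_converter n base) := by unfold Pre_converter; infer_instance

def pvWitness_converter : String × Int := ("101", 2)

def Spec_converter (n : String) (base : Int) (out : Int) : Prop := out = converter_alt n base
instance (n : String) (base : Int) (out : Int) : Decidable (Spec_converter n base out) := by unfold Spec_converter; infer_instance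

-- ===== CLAIM =====
def Claim_equal_converter : Prop := ∀ (n : String) (base : Int), Dom_converter n base → Pre_converter n base → Spec_converter n base (converter n base)

-- ===== LEMMAS AND PROOFS =====

-- Σ_i base^i * d(r[i]), recursively from the front
def posVal (base : Int) : List Char → Int
  | [] => 0
  | c :: r => pyDigit c + base * posVal base r

theorem convLoop_eq (base : Int) (r : List Char) (i : Nat) (total : Int) :
    convLoop r base total i = total + base ^ i * posVal base (r.drop i) := by
  by_cases h : i < r.length
  · rw [convLoop]
    simp only [h, if_pos]
    rw [convLoop_eq base r (i + 1)]
    have hd : r.drop i = r[i]! :: r.drop (i + 1) := by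
      have : r[i]! = r[i] := getElem!_pos r i h
      rw [this]
      exact List.drop_eq_getElem_cons h
    rw [hd, posVal]
    ring
  · rw [convLoop]
    simp only [h, if_neg, not_false_iff]
    rw [List.drop_of_length_le (Nat.le_of_not_lt h), posVal]
    ring
termination_by r.length - i

-- Horner step on an appended digit
theorem posVal_append (base : Int) (xs : List Char) (c : Char) :
    posVal base (xs ++ [c]) = base ^ xs.length * pyDigit c + posVal base xs := by
  induction xs with
  | nil => simp [posVal]
  | cons x xs ih => simp [posVal, ih, pow_succ]; ring

theorem horner_eq (base : Int) (l : List Char) (a : Int) :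
    l.foldl (fun total c => total * base + pyDigit c) a
      = a * base ^ l.length + posVal base l.reverse := by
  induction l generalizing a with
  | nil => simp [posVal]
  | cons c l ih =>
    simp only [List.foldl_cons, List.reverse_cons, List.length_cons]
    rw [ih, posVal_append]
    simp [pow_succ]
    ring

-- ===== VERDICT =====
theorem converter_spec : Claim_equal_converter := by
  intro n base _ _
  unfold Spec_converter converter converter_alt
  rw [convLoop_eq, horner_eq]
  simp
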